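-- pv_equiv track=rewrite | github.com/dorian68/Alphalens_n8n_to_python | backtest_module.py | _collect_decision_indices
-- ===== SOURCE A (Python) =====
-- from typing import Any, Dict, List, Optional, Tuple
--
-- def _collect_decision_indices(
--     start_idx: int,
--     end_idx: int,
--     warmup: int,
--     decision_every: int,
--     limit: int,
-- ) -> List[int]:
--     out: List[int] = []
--     j = start_idx
--     while j < end_idx and len(out) < limit:
--         if (j - warmup) % decision_every == 0:
--             out.append(j)
--         j += 1
--     return out
-- ===== SOURCE B (Python) =====
-- def _collect_decision_indices(
--     start_idx: int,
--     end_idx: int,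
--     warmup: int,
--     decision_every: int,
--     limit: int,
-- ):
--     if limit <= 0 or start_idx >= end_idx:
--         return []
--     step = abs(decision_every)
--     first = start_idx + (warmup - start_idx) % step
--     if first >= end_idx:
--         return []
--     count = (end_idx - first + step - 1) // step
--     return [first + k * step for k in range(min(limit, count))]
-- ===== Notes on version B (the rewrite author's own statement) =====
-- stated objective: alternative
-- what changed: Instead of scanning every index from start_idx to end_idx and testing the modulus, B computes the first matching index in closed form ((warmup - start_idx) % abs(decision_every)) and emits the arithmetic progression first, first+step, ... directly, bounded by end_idx and limit (O(output) work rather than O(range); a timing run could not confirm a consistent speed-up on the generated inputs).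
import Mathlib
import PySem

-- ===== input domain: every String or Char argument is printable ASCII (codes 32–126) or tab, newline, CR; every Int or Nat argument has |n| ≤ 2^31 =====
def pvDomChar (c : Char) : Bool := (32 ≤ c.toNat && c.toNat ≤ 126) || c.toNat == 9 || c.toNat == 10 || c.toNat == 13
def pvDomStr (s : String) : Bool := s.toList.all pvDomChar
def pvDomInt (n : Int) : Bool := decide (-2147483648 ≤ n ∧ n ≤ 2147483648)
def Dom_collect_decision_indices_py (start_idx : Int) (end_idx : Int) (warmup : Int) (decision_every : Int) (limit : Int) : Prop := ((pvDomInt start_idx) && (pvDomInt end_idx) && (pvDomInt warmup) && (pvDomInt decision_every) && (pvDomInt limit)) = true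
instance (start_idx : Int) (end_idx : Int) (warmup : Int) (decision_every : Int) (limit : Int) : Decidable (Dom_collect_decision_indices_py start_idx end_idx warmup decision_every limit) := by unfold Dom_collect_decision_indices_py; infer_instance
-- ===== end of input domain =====

-- B replaces A's per-index scan by a closed-form arithmetic progression (first matching index, step, count).

-- ===== PORT A =====
-- the while-loop of A, recursing on the distance end_idx - j
def pvALoop (end_idx warmup decision_every limit : Int) (j : Int) (out : List Int) : List Int :=
  if h : j < end_idx ∧ (out.length : Int) < limit then
    pvALoop end_idx warmup decision_every limit (j + 1)
      (if PySem.Int.mod (j - warmup) decision_every = 0 then out ++ [j] else out)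
  else out
termination_by (end_idx - j).toNat
decreasing_by omega

def collect_decision_indices_py (start_idx : Int) (end_idx : Int) (warmup : Int) (decision_every : Int) (limit : Int) : List Int :=
  pvALoop end_idx warmup decision_every limit start_idx []

-- ===== PORT B =====
def collect_decision_indices_py_alt (start_idx : Int) (end_idx : Int) (warmup : Int) (decision_every : Int) (limit : Int) : List Int :=
  if limit ≤ 0 ∨ end_idx ≤ start_idx then []
  else
    let step := |decision_every|
    let first := start_idx + PySem.Int.mod (warmup - start_idx) step
    if end_idx ≤ first then []
    else
      let count := PySem.Int.floordiv (end_idx - first + step - 1) step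
      (PySem.List.pyRange 0 (min limit count) 1).map (fun k => first + k * step)

-- ===== PRECONDITION & SPEC =====
-- Pre_ excludes exactly the inputs where A raises ZeroDivisionError: decision_every = 0 while the loop body runs.
def Pre_collect_decision_indices_py (start_idx : Int) (end_idx : Int) (warmup : Int) (decision_every : Int) (limit : Int) : Prop :=
  decision_every ≠ 0 ∨ end_idx ≤ start_idx ∨ limit ≤ 0
instance (start_idx : Int) (end_idx : Int) (warmup : Int) (decision_every : Int) (limit : Int) : Decidable (Pre_collect_decision_indices_py start_idx end_idx warmup decision_every limit) := by unfold Pre_collect_decision_indices_py; infer_instance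

def pvWitness_collect_decision_indices_py : Int × Int × Int × Int × Int := (0, 10, 2, 3, 4)

def Spec_collect_decision_indices_py (start_idx : Int) (end_idx : Int) (warmup : Int) (decision_every : Int) (limit : Int) (out : List Int) : Prop := out = collect_decision_indices_py_alt start_idx end_idx warmup decision_every limit
instance (start_idx : Int) (end_idx : Int) (warmup : Int) (decision_every : Int) (limit : Int) (out : List Int) : Decidable (Spec_collect_decision_indices_py start_idx end_idx warmup decision_every limit out) := by unfold Spec_collect_decision_indices_py; infer_instance

-- ===== CLAIM (what is proved, stated in full; the proofs are below) =====
def Claim_equal_collect_decision_indices_py : Prop := ∀ (start_idx : Int) (end_idx : Int) (warmup : Int) (decision_every : Int) (limit : Int), Dom_collect_decision_indices_py start_idx end_idx warmup decision_every limit → Pre_collect_decision_indices_py start_idx end_idx warmup decision_every limit → Spec_collect_decision_indices_py start_idx end_idx warmup decision_every limit (collect_decision_indices_py start_idx end_idx warmup decision_every limit)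

-- ===== LEMMAS AND PROOFS =====

-- closed-form model: first matching index ≥ j, its count below e, the progression
def pvFirst (w s j : Int) : Int := j + PySem.Int.mod (w - j) s
def pvCount (e w s j : Int) : Int := PySem.Int.floordiv (e - pvFirst w s j + s - 1) s
def pvModel (e w s j n : Int) : List Int :=
  (PySem.List.pyRange 0 (min n (pvCount e w s j)) 1).map (fun k => pvFirst w s j + k * s)

theorem pv_mod_unique (s x r : Int) (hs : 0 < s) (h1 : 0 ≤ r) (h2 : r < s) (h3 : s ∣ (x - r)) :
    PySem.Int.mod x s = r := by
  have hR := PySem.Int.floordiv_mul_add_mod x s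
  have h0 : 0 ≤ PySem.Int.mod x s := PySem.Int.mod_nonneg x hs
  have hlt : PySem.Int.mod x s < s := PySem.Int.mod_lt x hs
  obtain ⟨q, hq⟩ := h3
  have hdvd : s ∣ (PySem.Int.mod x s - r) :=
    ⟨q - PySem.Int.floordiv x s, by linarith [mul_sub s q (PySem.Int.floordiv x s)]⟩
  have hz : PySem.Int.mod x s - r = 0 :=
    Int.eq_zero_of_abs_lt_dvd hdvd (by rw [abs_lt]; omega)
  omega

theorem pvModel_nil (e w s j n : Int) (hs : 0 < s) (h : e ≤ pvFirst w s j ∨ n ≤ 0) :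
    pvModel e w s j n = [] := by
  have hmin : min n (pvCount e w s j) ≤ 0 := by
    rcases h with h | h
    · have hc : pvCount e w s j < 1 := by
        unfold pvCount
        rw [PySem.Int.floordiv_lt_iff_lt_mul hs]
        omega
      omega
    · omega
  unfold pvModel
  rw [PySem.List.pyRange_one_eq_nil hmin]
  rfl

theorem pv_first_eq (w s j : Int) (hm : PySem.Int.mod (w - j) s = 0) : pvFirst w s j = j := by
  unfold pvFirst; omega

theorem pv_first_succ_of_div (w s j : Int) (hs : 0 < s) (hm : PySem.Int.mod (w - j) s = 0) :
    pvFirst w s (j + 1) = j + s := by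
  have hd : s ∣ (w - j) := (PySem.Int.mod_eq_zero_iff_dvd _ _).mp hm
  have : PySem.Int.mod (w - (j + 1)) s = s - 1 := by
    apply pv_mod_unique s _ _ hs (by omega) (by omega)
    have : w - (j + 1) - (s - 1) = (w - j) - s := by ring
    rw [this]
    exact dvd_sub hd dvd_rfl
  unfold pvFirst; omega

theorem pvModel_cons (e w s j n : Int) (hs : 0 < s) (hj : j < e) (hn : 0 < n)
    (hm : PySem.Int.mod (w - j) s = 0) :
    pvModel e w s j n = j :: pvModel e w s (j + 1) (n - 1) := by
  have hf := pv_first_eq w s j hm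
  have hf' := pv_first_succ_of_div w s j hs hm
  -- counts
  set C' := pvCount e w s (j + 1) with hC'
  have hC'eq : C' = PySem.Int.floordiv (e - j - 1) s := by
    unfold pvCount at hC'; rw [hf'] at hC'
    rw [hC']; congr 1; ring
  have hb : C' * s ≤ e - j - 1 ∧ e - j - 1 < (C' + 1) * s := by
    rw [← PySem.Int.floordiv_eq_iff_of_pos hs]; exact hC'eq.symm
  have hC : pvCount e w s j = C' + 1 := by
    unfold pvCount; rw [hf]
    rw [PySem.Int.floordiv_eq_iff_of_pos hs]
    constructor
    · nlinarith [hb.1]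
    · nlinarith [hb.2]
  have hC'0 : 0 ≤ C' := by
    rw [hC'eq, PySem.Int.le_floordiv_iff_mul_le hs]
    omega
  -- list part
  set m := min n (pvCount e w s j) with hmdef
  have hm1 : 0 < m := by omega
  have hm' : min (n - 1) C' = m - 1 := by omega
  unfold pvModel
  rw [hf, hf', hm', ← hmdef]
  rw [PySem.List.pyRange_one_cons hm1]
  simp only [List.map_cons, zero_mul, add_zero, zero_add]
  congr 1
  simp only [PySem.List.pyRange_one, List.map_map, Int.sub_zero]
  apply List.map_congr_left
  intro k _
  simp only [Function.comp_apply]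
  ring

theorem pvModel_skip (e w s j n : Int) (hs : 0 < s)
    (hm : PySem.Int.mod (w - j) s ≠ 0) :
    pvModel e w s j n = pvModel e w s (j + 1) n := by
  have h0 : 0 ≤ PySem.Int.mod (w - j) s := PySem.Int.mod_nonneg _ hs
  have hlt : PySem.Int.mod (w - j) s < s := PySem.Int.mod_lt _ hs
  have hR := PySem.Int.floordiv_mul_add_mod (w - j) s
  have hf : pvFirst w s (j + 1) = pvFirst w s j := by
    have : PySem.Int.mod (w - (j + 1)) s = PySem.Int.mod (w - j) s - 1 := by
      apply pv_mod_unique s _ _ hs (by omega) (by omega)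
      exact ⟨PySem.Int.floordiv (w - j) s, by linarith⟩
    unfold pvFirst; omega
  unfold pvModel pvCount
  rw [hf]

theorem pv_first_ge (w s j : Int) (hs : 0 < s) : j ≤ pvFirst w s j := by
  have := PySem.Int.mod_nonneg (w - j) hs
  unfold pvFirst; omega

theorem pv_mod_iff (w d j : Int) (hd : d ≠ 0) :
    PySem.Int.mod (j - w) d = 0 ↔ PySem.Int.mod (w - j) |d| = 0 := by
  rw [PySem.Int.mod_eq_zero_iff_dvd, PySem.Int.mod_eq_zero_iff_dvd, abs_dvd,
    show w - j = -(j - w) by ring, dvd_neg]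

theorem pvALoop_eq_model (e w d lim : Int) (hd : d ≠ 0) :
    ∀ (fuel : Nat) (j : Int) (out : List Int), (e - j).toNat ≤ fuel →
      pvALoop e w d lim j out = out ++ pvModel e w |d| j (lim - out.length) := by
  have hs : 0 < |d| := abs_pos.mpr hd
  intro fuel
  induction fuel with
  | zero =>
    intro j out hf
    rw [pvALoop, dif_neg (by omega)]
    rw [pvModel_nil e w |d| j _ hs (Or.inl (by have := pv_first_ge w |d| j hs; omega))]
    simp
  | succ fuel ih =>
    intro j out hf
    rw [pvALoop]
    by_cases hc : j < e ∧ (out.length : Int) < lim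
    · rw [dif_pos hc]
      by_cases hm : PySem.Int.mod (j - w) d = 0
      · rw [if_pos hm]
        rw [ih (j + 1) (out ++ [j]) (by omega)]
        rw [pvModel_cons e w |d| j (lim - out.length) hs hc.1 (by omega)
            ((pv_mod_iff w d j hd).mp hm)]
        have hlen : lim - ((out ++ [j]).length : Int) = lim - out.length - 1 := by
          simp; ring
        rw [hlen]
        simp
      · rw [if_neg hm]
        rw [ih (j + 1) out (by omega)]
        rw [pvModel_skip e w |d| j (lim - out.length) hs
            (fun h => hm ((pv_mod_iff w d j hd).mpr h))]
    · rw [dif_neg hc]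
      rw [pvModel_nil e w |d| j _ hs]
      · simp
      · rcases not_and_or.mp hc with h | h
        · exact Or.inl (by have := pv_first_ge w |d| j hs; omega)
        · exact Or.inr (by omega)

theorem alt_eq_model (s e w d lim : Int) (hd : d ≠ 0) :
    collect_decision_indices_py_alt s e w d lim = pvModel e w |d| s lim := by
  have hs : 0 < |d| := abs_pos.mpr hd
  have hge := pv_first_ge w |d| s hs
  unfold collect_decision_indices_py_alt
  by_cases h1 : lim ≤ 0 ∨ e ≤ s
  · rw [if_pos h1]
    rcases h1 with h | h
    · exact (pvModel_nil e w |d| s lim hs (Or.inr h)).symm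
    · exact (pvModel_nil e w |d| s lim hs (Or.inl (by omega))).symm
  · rw [if_neg h1]
    by_cases h2 : e ≤ s + PySem.Int.mod (w - s) |d|
    · simp only [if_pos h2]
      exact (pvModel_nil e w |d| s lim hs (Or.inl h2)).symm
    · simp only [if_neg h2]
      rfl

-- ===== VERDICT (by name: the statement is the Claim_ definition above) =====
theorem collect_decision_indices_py_spec : Claim_equal_collect_decision_indices_py := by
  intro s e w d lim _ hpre
  unfold Spec_collect_decision_indices_py collect_decision_indices_py
  by_cases hd : d = 0
  · subst hd
    rcases hpre with h | h | h
    · exact absurd rfl h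
    · have hstop : ¬ (s < e ∧ ((([] : List Int).length : Int) < lim)) := by
        simp; omega
      rw [pvALoop, dif_neg hstop, collect_decision_indices_py_alt, if_pos (Or.inr h)]
    · have hstop : ¬ (s < e ∧ ((([] : List Int).length : Int) < lim)) := by
        simp; omega
      rw [pvALoop, dif_neg hstop, collect_decision_indices_py_alt, if_pos (Or.inl h)]
  · rw [pvALoop_eq_model e w d lim hd (e - s).toNat s [] le_rfl, alt_eq_model s e w d lim hd]
    simp
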